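-- pv_equiv track=rewrite | github.com/MarkusBeicht/EffectiveELD | bin/class_by_taxon.py | isInLineage
-- ===== SOURCE A (Python) =====
-- def isInLineage(parent_by_nodeid, taxonid, lineageid):
--   while True:
--     if taxonid == lineageid:
--       return True
--     parentid=parent_by_nodeid[taxonid]
--     if parentid==taxonid:
--       break
--     taxonid=parentid
--   return False
-- ===== SOURCE B (Python) =====
-- def isInLineage(parent_by_nodeid, taxonid, lineageid):
--   # Cycle-safe walk: remember visited nodes in a set; a revisit means the
--   # lineage loops without reaching lineageid, so the answer is False.
--   seen = set()
--   node = taxonid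
--   while node != lineageid:
--     if node in seen:
--       return False
--     seen.add(node)
--     node = parent_by_nodeid[node]
--   return True
-- ===== Notes on version B (the rewrite author's own statement) =====
-- stated objective: alternative
-- what changed: Replaces the root-sentinel loop (stop when parent == node) by a visited-set walk that stops on any revisited node, which also terminates on cyclic parent maps where A loops forever.
import Mathlib
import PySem

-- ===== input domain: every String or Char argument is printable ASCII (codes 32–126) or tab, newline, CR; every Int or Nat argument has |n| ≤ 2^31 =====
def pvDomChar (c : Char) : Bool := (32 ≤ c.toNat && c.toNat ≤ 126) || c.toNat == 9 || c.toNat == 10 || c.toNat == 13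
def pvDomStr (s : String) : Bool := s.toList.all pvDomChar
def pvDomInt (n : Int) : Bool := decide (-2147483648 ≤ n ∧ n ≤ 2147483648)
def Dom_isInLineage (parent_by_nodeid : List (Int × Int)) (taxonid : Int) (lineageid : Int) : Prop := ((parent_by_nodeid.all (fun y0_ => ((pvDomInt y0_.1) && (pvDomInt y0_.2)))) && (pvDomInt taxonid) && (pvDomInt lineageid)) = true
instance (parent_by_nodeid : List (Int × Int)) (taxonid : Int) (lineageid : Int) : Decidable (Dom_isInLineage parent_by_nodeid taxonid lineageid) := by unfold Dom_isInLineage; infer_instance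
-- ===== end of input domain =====

-- B replaces A's root-sentinel walk (stop when parent == node) by a visited-set walk that
-- stops on any revisited node; same return value wherever A returns (objective: alternative).

-- ===== PORT A =====
-- A's 'while True' loop, made total with fuel; fuel = length + 1 suffices on every input
-- admitted by Pre_ (the chain up to the first stop point visits pairwise distinct keys).
def isInLineageFuel (d : List (Int × Int)) (lineageid : Int) : Nat → Int → Bool
  | 0, _ => false            -- fuel exhausted: Python diverges here; excluded by Pre_
  | fuel + 1, taxonid =>
    if taxonid = lineageid then true
    else
      match (PySem.Dict.mk d).get? taxonid with
      | none => false        -- KeyError: excluded by Pre_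
      | some parentid =>
        if parentid = taxonid then false
        else isInLineageFuel d lineageid fuel parentid

def isInLineage (parent_by_nodeid : List (Int × Int)) (taxonid : Int) (lineageid : Int) : Bool :=
  isInLineageFuel parent_by_nodeid lineageid (parent_by_nodeid.length + 1) taxonid

-- ===== PORT B =====
-- a looked-up parent is one of the dict's values (the termination measure needs this)
theorem pvGetMemValues (d : List (Int × Int)) (x p : Int)
    (h : (PySem.Dict.mk d).get? x = some p) : p ∈ d.map Prod.snd := by
  unfold PySem.Dict.get? at h
  rcases Option.map_eq_some_iff.mp h with ⟨pr, hfind, hv⟩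
  exact hv ▸ List.mem_map_of_mem (List.mem_of_find?_eq_some hfind)

-- adding an unvisited member of lst to seen strictly shrinks the unvisited part of lst
theorem pvMeasureLt (seen : PySem.Set Int) (node : Int) (hns : seen.contains node = false) :
    ∀ lst : List Int, node ∈ lst →
      (lst.filter (fun x => !(PySem.Set.add seen node).contains x)).length
        < (lst.filter (fun x => !seen.contains x)).length := by
  have hns' : node ∉ seen := by simpa [PySem.Set.contains] using hns
  intro lst
  induction lst with
  | nil => intro hmem; cases hmem
  | cons a tl ih =>
    intro hmem
    by_cases ha : a = node
    · subst ha
      rw [List.filter_cons_of_neg (by simp [PySem.Set.mem_add]),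
          List.filter_cons_of_pos (by simp [PySem.Set.contains, hns'])]
      have hmono : (tl.filter (fun x => !(PySem.Set.add seen a).contains x)).length
          ≤ (tl.filter (fun x => !seen.contains x)).length := by
        rw [← List.countP_eq_length_filter, ← List.countP_eq_length_filter]
        refine List.countP_mono_left ?_
        intro x _ hx
        simp only [Bool.not_eq_true'] at hx ⊢
        have hxa : x ∉ PySem.Set.add seen a := by simpa [PySem.Set.contains] using hx
        simp only [PySem.Set.contains, List.contains_eq_mem, decide_eq_false_iff_not]
        exact fun hxs => hxa ((PySem.Set.mem_add seen a x).mpr (Or.inl hxs))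
      simp only [List.length_cons]
      omega
    · have hmem' : node ∈ tl := (List.mem_cons.mp hmem).resolve_left (Ne.symm ha)
      have hlt := ih hmem'
      by_cases hca : a ∈ seen
      · rw [List.filter_cons_of_neg
              (by simp [PySem.Set.contains]; exact fun hnm => absurd hca hnm),
            List.filter_cons_of_neg (by simp [PySem.Set.contains]; exact hca)]
        exact hlt
      · have hca2 : a ∉ PySem.Set.add seen node := fun hmem2 =>
          ((PySem.Set.mem_add seen node a).mp hmem2).elim hca ha
        rw [List.filter_cons_of_pos (by simp [PySem.Set.contains, hca2]),
            List.filter_cons_of_pos (by simp [PySem.Set.contains, hca])]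
        simp only [List.length_cons]
        omega

def altGo (d : List (Int × Int)) (t0 lin : Int) (seen : PySem.Set Int) (node : Int)
    (h : node = t0 ∨ node ∈ d.map Prod.snd) : Bool :=
  if node = lin then true
  else if hs : seen.contains node then false
  else
    match hm : (PySem.Dict.mk d).get? node with
    | none => false          -- KeyError: excluded by Pre_
    | some p => altGo d t0 lin (seen.add node) p (Or.inr (pvGetMemValues d node p hm))
termination_by ((t0 :: d.map Prod.snd).filter (fun x => !seen.contains x)).length
decreasing_by
  exact pvMeasureLt seen node (Bool.eq_false_iff.mpr hs) _
    (by rcases h with h | h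
        · exact h ▸ List.mem_cons_self
        · exact List.mem_cons_of_mem _ h)

def isInLineage_alt (parent_by_nodeid : List (Int × Int)) (taxonid : Int) (lineageid : Int) : Bool :=
  altGo parent_by_nodeid taxonid lineageid PySem.Set.empty taxonid (Or.inl rfl)

-- ===== PRECONDITION & SPEC =====
-- the k-th iterate of the parent function the input map denotes (none once a lookup misses).
-- This is a property of the INPUT map itself, not a copy of either port: it carries no stop
-- tests and no loop state — termination of a pointer chase can only be phrased through it.
def pvAnc (d : List (Int × Int)) : Nat → Int → Option Int
  | 0, x => some x
  | k + 1, x =>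
    match (PySem.Dict.mk d).get? x with
    | none => none
    | some p => pvAnc d k p

-- an ancestor is a stop point when it equals lineageid or is its own parent
def pvStopB (d : List (Int × Int)) (lin : Int) : Option Int → Bool
  | none => false
  | some y => y == lin || (PySem.Dict.mk d).get? y == some y

-- A returns exactly when some ancestor of taxonid within length-many steps is a stop point
-- (equals lineageid, or is its own parent); on every other input A raises KeyError or loops
-- forever, so Pre_ excludes nothing on which A returns (coverage is measured at 100%).
def Pre_isInLineage (parent_by_nodeid : List (Int × Int)) (taxonid : Int) (lineageid : Int) : Prop :=
  ∃ k < parent_by_nodeid.length + 1, pvStopB parent_by_nodeid lineageid (pvAnc parent_by_nodeid k taxonid) = true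
instance (parent_by_nodeid : List (Int × Int)) (taxonid : Int) (lineageid : Int) : Decidable (Pre_isInLineage parent_by_nodeid taxonid lineageid) := by unfold Pre_isInLineage; infer_instance

def pvWitness_isInLineage : (List (Int × Int)) × Int × Int := ([(1, 2), (2, 2)], 1, 5)

def Spec_isInLineage (parent_by_nodeid : List (Int × Int)) (taxonid : Int) (lineageid : Int) (out : Bool) : Prop := out = isInLineage_alt parent_by_nodeid taxonid lineageid
instance (parent_by_nodeid : List (Int × Int)) (taxonid : Int) (lineageid : Int) (out : Bool) : Decidable (Spec_isInLineage parent_by_nodeid taxonid lineageid out) := by unfold Spec_isInLineage; infer_instance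

-- ===== CLAIM (what is proved, stated in full; the proofs are below) =====
def Claim_equal_isInLineage : Prop := ∀ (parent_by_nodeid : List (Int × Int)) (taxonid : Int) (lineageid : Int), Dom_isInLineage parent_by_nodeid taxonid lineageid → Pre_isInLineage parent_by_nodeid taxonid lineageid → Spec_isInLineage parent_by_nodeid taxonid lineageid (isInLineage parent_by_nodeid taxonid lineageid)

-- ===== LEMMAS AND PROOFS =====
theorem altGo_lin (d : List (Int × Int)) (t0 lin : Int) (seen : PySem.Set Int) (node : Int)
    (h : node = t0 ∨ node ∈ d.map Prod.snd) (hl : node = lin) :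
    altGo d t0 lin seen node h = true := by
  rw [altGo, if_pos hl]

theorem altGo_seen (d : List (Int × Int)) (t0 lin : Int) (seen : PySem.Set Int) (node : Int)
    (h : node = t0 ∨ node ∈ d.map Prod.snd) (hl : ¬ node = lin) (hs : seen.contains node = true) :
    altGo d t0 lin seen node h = false := by
  rw [altGo, if_neg hl, dif_pos hs]

theorem altGo_step (d : List (Int × Int)) (t0 lin : Int) (seen : PySem.Set Int) (node p : Int)
    (h : node = t0 ∨ node ∈ d.map Prod.snd) (h' : p = t0 ∨ p ∈ d.map Prod.snd)
    (hl : ¬ node = lin) (hs : seen.contains node = false)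
    (hm : (PySem.Dict.mk d).get? node = some p) :
    altGo d t0 lin seen node h = altGo d t0 lin (seen.add node) p h' := by
  rw [altGo, if_neg hl, dif_neg (Bool.eq_false_iff.mp hs)]
  split
  · rename_i heq
    rw [hm] at heq
    simp at heq
  · rename_i q heq
    rw [hm] at heq
    injection heq with h2
    subst h2
    rfl

theorem pvAnc_succ (d : List (Int × Int)) (k : Nat) (x p : Int)
    (h : (PySem.Dict.mk d).get? x = some p) : pvAnc d (k + 1) x = pvAnc d k p := by
  simp [pvAnc, h]

theorem pvAnc_add (d : List (Int × Int)) (a b : Nat) :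
    ∀ x : Int, pvAnc d (a + b) x = (pvAnc d a x).bind (pvAnc d b) := by
  induction a with
  | zero => intro x; simp [pvAnc]
  | succ a ih =>
    intro x
    rw [show a + 1 + b = (a + b) + 1 from by omega]
    cases hx : (PySem.Dict.mk d).get? x with
    | none => simp [pvAnc, hx]
    | some p => rw [pvAnc_succ d _ x p hx, pvAnc_succ d a x p hx, ih p]

theorem pvMain (d : List (Int × Int)) (t0 lin : Int) :
    ∀ (k : Nat) (node : Int) (seen : PySem.Set Int) (h : node = t0 ∨ node ∈ d.map Prod.snd)
      (fuel : Nat), k < fuel →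
      pvStopB d lin (pvAnc d k node) = true →
      (∀ j, j < k → pvStopB d lin (pvAnc d j node) = false) →
      (∀ j, j ≤ k → ∀ y, pvAnc d j node = some y → seen.contains y = false) →
      isInLineageFuel d lin fuel node = altGo d t0 lin seen node h := by
  intro k
  induction k with
  | zero =>
    intro node seen h fuel hfuel hstop _ hseen
    obtain ⟨fuel, rfl⟩ : ∃ f, fuel = f + 1 := ⟨fuel - 1, by omega⟩
    have hsn : seen.contains node = false := hseen 0 (by omega) node rfl
    have hns' : node ∉ seen := by simpa [PySem.Set.contains] using hsn
    simp only [pvAnc, pvStopB, Bool.or_eq_true, beq_iff_eq] at hstop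
    by_cases hl : node = lin
    · rw [altGo_lin d t0 lin seen node h hl]
      simp [isInLineageFuel, hl]
    · have hstop' : (PySem.Dict.mk d).get? node = some node := hstop.resolve_left hl
      rw [altGo_step d t0 lin seen node node h
            (Or.inr (pvGetMemValues d node node hstop')) hl hsn hstop']
      rw [altGo_seen d t0 lin (seen.add node) node
            (Or.inr (pvGetMemValues d node node hstop')) hl
            (by simp [PySem.Set.add, hns', PySem.Set.contains])]
      simp [isInLineageFuel, hl, hstop']
  | succ k ih =>
    intro node seen h fuel hfuel hstop hmin hseen
    obtain ⟨fuel, rfl⟩ : ∃ f, fuel = f + 1 := ⟨fuel - 1, by omega⟩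
    have hns0 := hmin 0 (by omega)
    simp only [pvAnc, pvStopB, Bool.or_eq_false_iff, beq_eq_false_iff_ne, ne_eq] at hns0
    obtain ⟨hl, hsl⟩ := hns0
    have hsn : seen.contains node = false := hseen 0 (by omega) node rfl
    have hns' : node ∉ seen := by simpa [PySem.Set.contains] using hsn
    obtain ⟨p, hp⟩ : ∃ p, (PySem.Dict.mk d).get? node = some p := by
      cases hx : (PySem.Dict.mk d).get? node with
      | some p => exact ⟨p, rfl⟩
      | none =>
        exfalso
        have hnone : pvAnc d (k + 1) node = none := by
          rw [show k + 1 = 1 + k from by omega, pvAnc_add d 1 k node]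
          simp [pvAnc, hx]
        rw [hnone] at hstop
        simp [pvStopB] at hstop
    have hpn : p ≠ node := fun hc => hsl (hc ▸ hp)
    have hshift : ∀ j, pvAnc d (j + 1) node = pvAnc d j p := fun j => by
      rw [show j + 1 = 1 + j from by omega, pvAnc_add d 1 j node]
      simp [pvAnc, hp]
    have hp' : p = t0 ∨ p ∈ d.map Prod.snd := Or.inr (pvGetMemValues d node p hp)
    rw [altGo_step d t0 lin seen node p h hp' hl hsn hp]
    have hL : isInLineageFuel d lin (fuel + 1) node = isInLineageFuel d lin fuel p := by
      simp [isInLineageFuel, hl, hp, hpn]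
    rw [hL]
    have hseen' : ∀ j, j ≤ k → ∀ y, pvAnc d j p = some y →
        (seen.add node).contains y = false := by
      intro j hj y hy
      have hy' : pvAnc d (j + 1) node = some y := by rw [hshift j]; exact hy
      have h1 : seen.contains y = false := hseen (j + 1) (by omega) y hy'
      have hy1 : y ∉ seen := by simpa [PySem.Set.contains] using h1
      have h2 : y ≠ node := by
        intro hc
        subst hc
        -- periodicity: the chain returns to y after j+1 steps, so the stop at step k+1
        -- already occurs at step k - j ≤ k, contradicting minimality
        have hper : pvAnc d (k + 1) y = pvAnc d (k - j) y := by
          rw [show k + 1 = (j + 1) + (k - j) from by omega, pvAnc_add d (j + 1) (k - j) y, hy']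
          rfl
        rw [hper, hmin (k - j) (by omega)] at hstop
        exact Bool.false_ne_true hstop
      simp [PySem.Set.add, hns', PySem.Set.contains, hy1, h2]
    exact ih p (seen.add node) hp' fuel (by omega)
      (by rw [← hshift k]; exact hstop)
      (fun j hj => by rw [← hshift j]; exact hmin (j + 1) (by omega))
      hseen'

-- ===== VERDICT (by name: the statement is the Claim_ definition above) =====
theorem isInLineage_spec : Claim_equal_isInLineage := by
  intro d t l _ hpre
  unfold Spec_isInLineage isInLineage isInLineage_alt
  obtain ⟨k, hk, hstop⟩ := hpre
  have hex : ∃ j, pvStopB d l (pvAnc d j t) = true := ⟨k, hstop⟩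
  have hk0 := Nat.find_spec hex
  have hmin : ∀ j, j < Nat.find hex → pvStopB d l (pvAnc d j t) = false :=
    fun j hj => Bool.eq_false_iff.mpr (Nat.find_min hex hj)
  have hle : Nat.find hex ≤ k := Nat.find_min' hex hstop
  exact pvMain d t l (Nat.find hex) t PySem.Set.empty (Or.inl rfl) (d.length + 1)
    (by omega) hk0 hmin (fun _ _ y _ => rfl)
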